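-- pv_equiv track=rewrite | github.com/kristbaum/arthistorical-semantic-data-extraction | src/xml_to_markdown.py | _parse_coords
-- ===== SOURCE A (Python) =====
-- def _parse_coords(points_str: str) -> tuple[int, int, int, int]:
--     pairs = []
--     for pair in points_str.strip().split():
--         parts = pair.split(",")
--         if len(parts) == 2:
--             pairs.append((int(parts[0]), int(parts[1])))
--     if not pairs:
--         return 0, 0, 0, 0
--     xs = [p[0] for p in pairs]
--     ys = [p[1] for p in pairs]
--     return min(xs), min(ys), max(xs) - min(xs), max(ys) - min(ys)
-- ===== SOURCE B (Python) =====
-- def _parse_coords(points_str: str) -> tuple[int, int, int, int]: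
--     box = None
--     for pair in points_str.strip().split():
--         parts = pair.split(",")
--         if len(parts) == 2:
--             x, y = int(parts[0]), int(parts[1])
--             if box is None:
--                 box = (x, y, x, y)
--             else:
--                 box = (min(box[0], x), min(box[1], y), max(box[2], x), max(box[3], y))
--     if box is None:
--         return 0, 0, 0, 0
--     return box[0], box[1], box[2] - box[0], box[3] - box[1]
-- ===== Notes on version B (the rewrite author's own statement) =====
-- stated objective: simpler
-- what changed: B replaces A's build-a-pair-list-then-four-min/max-rescans structure with a single pass that maintains a running bounding-box accumulator (initialised on the first valid pair), so no intermediate lists are built.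
import Mathlib
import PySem

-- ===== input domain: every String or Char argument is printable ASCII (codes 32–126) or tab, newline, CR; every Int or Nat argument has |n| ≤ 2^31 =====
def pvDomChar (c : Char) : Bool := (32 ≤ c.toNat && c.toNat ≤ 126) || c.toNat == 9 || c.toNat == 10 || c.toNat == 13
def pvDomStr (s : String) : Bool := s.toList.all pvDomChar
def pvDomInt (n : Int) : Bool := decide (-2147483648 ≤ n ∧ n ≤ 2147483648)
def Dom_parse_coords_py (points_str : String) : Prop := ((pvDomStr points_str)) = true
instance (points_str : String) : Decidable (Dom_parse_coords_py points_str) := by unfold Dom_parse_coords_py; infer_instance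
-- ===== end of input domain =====

-- B replaces A's build-a-pair-list-then-four-min/max-rescans structure with a single
-- accumulator pass maintaining a running bounding box; same return value on Pre_.

-- ===== PORT A =====
-- one iteration of A's pair-collecting loop (int() raises where ofStr? is none; excluded by Pre_)
def pvStepA (acc : List (Int × Int)) (pair : String) : List (Int × Int) :=
  let parts := (PySem.Str.split? pair ",").getD []   -- sep "," ≠ "", so split? is always some
  if parts.length = 2 then
    acc ++ [((PySem.Int.ofStr? (PySem.List.pyGetD parts 0 "")).getD 0,
             (PySem.Int.ofStr? (PySem.List.pyGetD parts 1 "")).getD 0)]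
  else acc

def parse_coords_py (points_str : String) : Int × Int × Int × Int :=
  let pairs := (PySem.Str.split₀ (PySem.Str.strip points_str)).foldl pvStepA []
  if pairs = [] then (0, 0, 0, 0)
  else
    let xs := pairs.map (fun p => p.1)
    let ys := pairs.map (fun p => p.2)
    ((PySem.List.min? xs (fun v => v)).getD 0,
     (PySem.List.min? ys (fun v => v)).getD 0,
     (PySem.List.max? xs (fun v => v)).getD 0 - (PySem.List.min? xs (fun v => v)).getD 0,
     (PySem.List.max? ys (fun v => v)).getD 0 - (PySem.List.min? ys (fun v => v)).getD 0)

-- ===== PORT B =====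
-- one iteration of B's bounding-box loop
def pvStepB (box : Option (Int × Int × Int × Int)) (pair : String) : Option (Int × Int × Int × Int) :=
  match (PySem.Str.split? pair ",").getD [] with
  | [a, b] =>
    let x := (PySem.Int.ofStr? a).getD 0
    let y := (PySem.Int.ofStr? b).getD 0
    match box with
    | none => some (x, y, x, y)
    | some (mnx, mny, mxx, mxy) => some (min mnx x, min mny y, max mxx x, max mxy y)
  | _ => box

def parse_coords_py_alt (points_str : String) : Int × Int × Int × Int :=
  match (PySem.Str.split₀ (PySem.Str.strip points_str)).foldl pvStepB none with
  | none => (0, 0, 0, 0)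
  | some (mnx, mny, mxx, mxy) => (mnx, mny, mxx - mnx, mxy - mny)

-- ===== PRECONDITION & SPEC =====
-- Pre_ excludes exactly the inputs where Python A raises ValueError: some whitespace-separated
-- token splits at the comma into exactly two parts of which at least one int() rejects.
def Pre_parse_coords_py (points_str : String) : Prop :=
  ∀ pair ∈ PySem.Str.split₀ (PySem.Str.strip points_str),
    ((PySem.Str.split? pair ",").getD []).length = 2 →
    ∀ part ∈ (PySem.Str.split? pair ",").getD [], (PySem.Int.ofStr? part).isSome = true
instance (points_str : String) : Decidable (Pre_parse_coords_py points_str) := by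
  unfold Pre_parse_coords_py; infer_instance
def pvWitness_parse_coords_py : String := " 1,2  3,-4 x 1,2,3 "
def Spec_parse_coords_py (points_str : String) (out : Int × Int × Int × Int) : Prop := out = parse_coords_py_alt points_str
instance (points_str : String) (out : Int × Int × Int × Int) : Decidable (Spec_parse_coords_py points_str out) := by unfold Spec_parse_coords_py; infer_instance

-- ===== CLAIM (what is proved, stated in full; the proofs are below) =====
def Claim_equal_parse_coords_py : Prop := ∀ (points_str : String), Dom_parse_coords_py points_str → Pre_parse_coords_py points_str → Spec_parse_coords_py points_str (parse_coords_py points_str)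

-- ===== LEMMAS AND PROOFS =====

-- the parsed pair extracted from one token (shared characterisation of both loops)
def pvPair (pair : String) : Option (Int × Int) :=
  match (PySem.Str.split? pair ",").getD [] with
  | [a, b] => some ((PySem.Int.ofStr? a).getD 0, (PySem.Int.ofStr? b).getD 0)
  | _ => none

lemma foldA_eq_filterMap (L : List String) (ps : List (Int × Int)) :
    L.foldl pvStepA ps = ps ++ L.filterMap pvPair := by
  induction L generalizing ps with
  | nil => simp
  | cons t L ih =>
    simp only [List.foldl_cons, List.filterMap_cons, ih]
    rcases h : (PySem.Str.split? t ",").getD [] with _ | ⟨a, _ | ⟨b, _ | ⟨c, rest⟩⟩⟩ <;>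
      simp [pvPair, pvStepA, h, PySem.List.pyGetD]

-- the pair-level bounding-box update B's loop performs
def pvStepP (box : Option (Int × Int × Int × Int)) (p : Int × Int) : Option (Int × Int × Int × Int) :=
  match box with
  | none => some (p.1, p.2, p.1, p.2)
  | some (mnx, mny, mxx, mxy) => some (min mnx p.1, min mny p.2, max mxx p.1, max mxy p.2)

lemma foldB_eq_filterMap (L : List String) (box : Option (Int × Int × Int × Int)) :
    L.foldl pvStepB box = (L.filterMap pvPair).foldl pvStepP box := by
  induction L generalizing box with
  | nil => simp
  | cons t L ih =>
    simp only [List.foldl_cons, List.filterMap_cons, ih]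
    rcases h : (PySem.Str.split? t ",").getD [] with _ | ⟨a, _ | ⟨b, _ | ⟨c, rest⟩⟩⟩ <;>
      simp [pvPair, pvStepB, pvStepP, h]

lemma foldP_some (ps : List (Int × Int)) (a b c d : Int) :
    ps.foldl pvStepP (some (a, b, c, d))
    = some (ps.foldl (fun m p => min m p.1) a, ps.foldl (fun m p => min m p.2) b,
            ps.foldl (fun m p => max m p.1) c, ps.foldl (fun m p => max m p.2) d) := by
  induction ps generalizing a b c d with
  | nil => rfl
  | cons p ps ih =>
    rw [List.foldl_cons, List.foldl_cons, List.foldl_cons, List.foldl_cons, List.foldl_cons,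
        show pvStepP (some (a, b, c, d)) p = some (min a p.1, min b p.2, max c p.1, max d p.2) from rfl, ih]

-- A's tail (list-then-min/max) and B's tail (bounding-box fold) agree on the same pair list
lemma bbox_eq (Q : List (Int × Int)) :
    (if ([] ++ Q : List (Int × Int)) = [] then ((0 : Int), (0 : Int), (0 : Int), (0 : Int)) else
      ((PySem.List.min? (([] ++ Q).map (fun (p : Int × Int) => p.1)) (fun v => v)).getD 0,
       (PySem.List.min? (([] ++ Q).map (fun (p : Int × Int) => p.2)) (fun v => v)).getD 0,
       (PySem.List.max? (([] ++ Q).map (fun (p : Int × Int) => p.1)) (fun v => v)).getD 0 -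
         (PySem.List.min? (([] ++ Q).map (fun (p : Int × Int) => p.1)) (fun v => v)).getD 0,
       (PySem.List.max? (([] ++ Q).map (fun (p : Int × Int) => p.2)) (fun v => v)).getD 0 -
         (PySem.List.min? (([] ++ Q).map (fun (p : Int × Int) => p.2)) (fun v => v)).getD 0))
    = (match Q.foldl pvStepP none with
       | none => ((0 : Int), (0 : Int), (0 : Int), (0 : Int))
       | some (mnx, mny, mxx, mxy) => (mnx, mny, mxx - mnx, mxy - mny)) := by
  rcases Q with _ | ⟨p, ps⟩
  · rfl
  · rw [List.foldl_cons, show pvStepP none p = some (p.1, p.2, p.1, p.2) from rfl, foldP_some]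
    simp [PySem.List.min?_id_cons, PySem.List.max?_id_cons, List.foldl_map]

-- ===== VERDICT (by name: the statement is the Claim_ definition above) =====
set_option maxHeartbeats 1000000 in
theorem parse_coords_py_spec : Claim_equal_parse_coords_py := by
  intro s _ _
  unfold Spec_parse_coords_py parse_coords_py parse_coords_py_alt
  rw [foldA_eq_filterMap, foldB_eq_filterMap]
  exact bbox_eq _
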